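-- pv_equiv track=rewrite | github.com/blameturner/JeffGPT-Harness | tools/insight/agent.py | _title_and_lead
-- ===== SOURCE A (Python) =====
-- def _title_and_lead(briefing: str, fallback_topic: str) -> tuple[str, str]:
--     lines = [ln.rstrip() for ln in briefing.splitlines()]
--     title = fallback_topic
--     lead = ""
--     for ln in lines:
--         if ln.startswith("# ") and title == fallback_topic:
--             title = ln.lstrip("# ").strip()
--         elif ln and not ln.startswith("#"):
--             lead = ln.strip()
--             if lead:
--                 break
--     return title[:200], lead[:400]
-- ===== SOURCE B (Python) =====
-- def _title_and_lead(briefing: str, fallback_topic: str) -> tuple[str, str]: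
--     # Two independent passes: locate the lead line, then take the first
--     # heading that precedes it as the title.
--     lines = [ln.rstrip() for ln in briefing.splitlines()]
--     cut = next((i for i, ln in enumerate(lines) if ln and not ln.startswith("#")), len(lines))
--     lead = lines[cut].strip() if cut < len(lines) else ""
--     title = next((ln.lstrip("# ").strip() for ln in lines[:cut] if ln.startswith("# ")), fallback_topic)
--     return title[:200], lead[:400]
-- ===== Notes on version B (the rewrite author's own statement) =====
-- stated objective: simpler
-- what changed: Replaced A's single stateful loop (title/lead accumulators with an early break) by two independent passes: locate the lead line, then take the first heading preceding it as the title.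
-- intended difference: On briefings whose first heading before the lead line has text equal to fallback_topic while a later heading's (200-char-truncated) text differs, A skips the first heading and returns the later heading's text, while B returns the first heading's text; the first heading is the document's title, so B's value is the intended one. — e.g. on _title_and_lead("# T\n# U\nx", "T"): A returns ("U", "x"), B returns ("T", "x")
import Mathlib
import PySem

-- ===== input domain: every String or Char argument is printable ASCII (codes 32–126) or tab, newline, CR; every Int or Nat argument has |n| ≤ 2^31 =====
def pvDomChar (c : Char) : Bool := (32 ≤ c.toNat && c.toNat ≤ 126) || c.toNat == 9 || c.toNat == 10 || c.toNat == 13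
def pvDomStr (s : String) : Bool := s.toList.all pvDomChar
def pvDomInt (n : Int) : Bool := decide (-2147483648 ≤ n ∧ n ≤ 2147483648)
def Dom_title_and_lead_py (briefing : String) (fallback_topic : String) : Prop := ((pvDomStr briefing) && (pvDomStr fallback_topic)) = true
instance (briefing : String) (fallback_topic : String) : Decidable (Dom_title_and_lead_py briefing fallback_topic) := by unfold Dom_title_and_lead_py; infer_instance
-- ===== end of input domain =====

-- B replaces A's single stateful loop by two independent passes (find the lead line,
-- then take the first heading before it as the title); objective: simpler. B returns
-- the FIRST heading's text where A skips headings equal to fallback_topic (see D_).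

-- s.lstrip("# "): drop leading '#' and ' ' characters (hand port, exact: the chars
-- argument is the two-character set {'#', ' '})
def pvLstripHashSpace (s : String) : String :=
  String.ofList (s.toList.dropWhile (fun c => c == '#' || c == ' '))

-- [ln.rstrip() for ln in briefing.splitlines()] (both ports start with this)
def pvLines (b : String) : List String := (PySem.Str.splitlines b).map PySem.Str.rstrip

-- ln.lstrip("# ").strip(): the text of a heading line (both ports compute this)
def pvHeadingText (l : String) : String := PySem.Str.strip (pvLstripHashSpace l)

-- ===== PORT A =====
-- the for-loop of A: state (title, lead); returning from the recursion early = break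
def pvALoop (fb : String) : List String → String → String → String × String
  | [], title, lead => (title, lead)
  | ln :: rest, title, lead =>
    if PySem.Str.startswith ln "# " && title == fb then
      pvALoop fb rest (pvHeadingText ln) lead
    else if ln != "" && !PySem.Str.startswith ln "#" then
      let lead' := PySem.Str.strip ln
      if lead' != "" then (title, lead')          -- break
      else pvALoop fb rest title lead'
    else pvALoop fb rest title lead

def title_and_lead_py (briefing : String) (fallback_topic : String) : String × String :=
  let lines := pvLines briefing
  let r := pvALoop fallback_topic lines fallback_topic ""
  (PySem.Str.slice r.1 none (some 200), PySem.Str.slice r.2 none (some 400))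

-- ===== PORT B =====
def title_and_lead_py_alt (briefing : String) (fallback_topic : String) : String × String :=
  let lines := pvLines briefing
  let cut := lines.findIdx (fun ln => ln != "" && !PySem.Str.startswith ln "#")
  let lead := (lines[cut]?.map PySem.Str.strip).getD ""
  let title := (((lines.take cut).filterMap
    (fun ln => if PySem.Str.startswith ln "# " then some (pvHeadingText ln) else none)).head?).getD fallback_topic
  (PySem.Str.slice title none (some 200), PySem.Str.slice lead none (some 400))

-- ===== PRECONDITION & SPEC =====
-- On briefings whose first heading line before the lead has text equal to
-- fallback_topic while a later heading before the lead differs (up to the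
-- 200-char truncation), A skips the first heading and returns the later
-- heading's text, while B returns the first heading's text; the first heading
-- is the document's title, so B's value is the intended one.
def D_title_and_lead_py (briefing : String) (fallback_topic : String) : Prop :=
  let ts := (((pvLines briefing).takeWhile
      (fun l => l == "" || PySem.Str.startswith l "#")).filter
      (fun l => PySem.Str.startswith l "# ")).map pvHeadingText
  ts.head? = some fallback_topic ∧
    ∃ t ∈ ts.tail.find? (fun x => x != fallback_topic),
      t.toList.take 200 ≠ fallback_topic.toList.take 200
instance (briefing : String) (fallback_topic : String) : Decidable (D_title_and_lead_py briefing fallback_topic) := by unfold D_title_and_lead_py; infer_instance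

def Spec_title_and_lead_py (briefing : String) (fallback_topic : String) (out : String × String) : Prop := ¬ D_title_and_lead_py briefing fallback_topic → out = title_and_lead_py_alt briefing fallback_topic
instance (briefing : String) (fallback_topic : String) (out : String × String) : Decidable (Spec_title_and_lead_py briefing fallback_topic out) := by unfold Spec_title_and_lead_py; infer_instance

def pvDiffWitness_title_and_lead_py : String × String := ("# T\n# U\nx", "T")
def pvDiffWitnessOut_title_and_lead_py : (String × String) × (String × String) := (("U", "x"), ("T", "x"))

-- ===== CLAIM (what is proved, stated in full; the proofs are below) =====
def Claim_unchanged_title_and_lead_py : Prop := ∀ (briefing : String) (fallback_topic : String), Dom_title_and_lead_py briefing fallback_topic → Spec_title_and_lead_py briefing fallback_topic (title_and_lead_py briefing fallback_topic)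
def Claim_changed_title_and_lead_py : Prop := Dom_title_and_lead_py (pvDiffWitness_title_and_lead_py.1) (pvDiffWitness_title_and_lead_py.2) ∧ D_title_and_lead_py (pvDiffWitness_title_and_lead_py.1) (pvDiffWitness_title_and_lead_py.2) ∧ title_and_lead_py (pvDiffWitness_title_and_lead_py.1) (pvDiffWitness_title_and_lead_py.2) = pvDiffWitnessOut_title_and_lead_py.1 ∧ title_and_lead_py_alt (pvDiffWitness_title_and_lead_py.1) (pvDiffWitness_title_and_lead_py.2) = pvDiffWitnessOut_title_and_lead_py.2 ∧ pvDiffWitnessOut_title_and_lead_py.1 ≠ pvDiffWitnessOut_title_and_lead_py.2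
def Claim_exact_title_and_lead_py : Prop := ∀ (briefing : String) (fallback_topic : String), Dom_title_and_lead_py briefing fallback_topic → D_title_and_lead_py briefing fallback_topic → title_and_lead_py briefing fallback_topic ≠ title_and_lead_py_alt briefing fallback_topic

-- ===== LEMMAS AND PROOFS =====

-- proof-side abbreviations
def pvP (ln : String) : Bool := ln != "" && !PySem.Str.startswith ln "#"

def pvCands (lines : List String) : List String :=
  (lines.take (lines.findIdx pvP)).filterMap
    (fun ln => if PySem.Str.startswith ln "# " then some (pvHeadingText ln) else none)

-- abbreviations for the two results, used only by the proofs
def pvLeadB (lines : List String) : String :=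
  ((lines[lines.findIdx pvP]?).map PySem.Str.strip).getD ""

-- A's title: first heading text ≠ fb among the headings before the lead line
def pvTitleA (fb : String) (lines : List String) : String :=
  ((pvCands lines).find? (fun t => t != fb)).getD fb

-- a non-empty rstripped line has a non-empty strip
theorem pvChars_strip_rstrip_ne (l : List Char) (h : PySem.Chars.rstrip l ≠ []) :
    PySem.Chars.strip (PySem.Chars.rstrip l) ≠ [] := by
  intro hc
  set y := PySem.Chars.rstrip l with hy
  have hall1 : ∀ c ∈ PySem.Chars.lstrip y, PySem.Chars.isspace c = true := by
    have h2 := hc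
    simp only [PySem.Chars.strip, PySem.Chars.rstrip, List.reverse_eq_nil_iff,
      List.dropWhile_eq_nil_iff, List.mem_reverse] at h2
    exact h2
  have hall : ∀ c ∈ y, PySem.Chars.isspace c = true := by
    intro c hcy
    rw [← List.takeWhile_append_dropWhile (p := PySem.Chars.isspace) (l := y)] at hcy
    rcases List.mem_append.1 hcy with h1 | h2
    · exact List.mem_takeWhile_imp h1
    · exact hall1 c h2
  have hyr : y.reverse ≠ [] := by simpa using h
  have hrewr : y.reverse = List.dropWhile PySem.Chars.isspace l.reverse := by
    simp [hy, PySem.Chars.rstrip]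
  have hyr' : List.dropWhile PySem.Chars.isspace l.reverse ≠ [] := hrewr ▸ hyr
  have hhead := List.head_dropWhile_not PySem.Chars.isspace hyr'
  have hmem : (List.dropWhile PySem.Chars.isspace l.reverse).head hyr' ∈ y := by
    rw [← List.mem_reverse, hrewr]
    exact List.head_mem hyr'
  rw [hall _ hmem] at hhead
  exact absurd hhead (by simp)

theorem pvStrip_rstrip_ne (x : String) (h : PySem.Str.rstrip x ≠ "") :
    PySem.Str.strip (PySem.Str.rstrip x) ≠ "" := by
  intro hc
  have h' : PySem.Chars.rstrip x.toList ≠ [] := by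
    intro he
    apply h
    simp [PySem.Str.rstrip, he]
  apply pvChars_strip_rstrip_ne x.toList h'
  have := congrArg String.toList hc
  simpa [PySem.Str.strip, PySem.Str.rstrip, String.toList_ofList] using this

-- a "# "-prefixed line is "#"-prefixed
theorem pvHashOfHashSpace' {l : List Char} (h : PySem.Chars.startswith l ['#', ' '] = true) :
    PySem.Chars.startswith l ['#'] = true := by
  rw [PySem.Chars.startswith_iff] at h ⊢
  exact List.IsPrefix.trans ⟨[' '], rfl⟩ h

theorem pvHashOfHashSpace {ln : String} (hh : PySem.Str.startswith ln "# " = true) :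
    PySem.Chars.startswith ln.toList ['#'] = true := by
  simp only [PySem.Str.startswith_eq] at hh
  exact pvHashOfHashSpace' hh

-- once title ≠ fb, the loop only searches for the lead
theorem pvALoop_fixed (fb title : String) (hne : (title == fb) = false) (lines : List String)
    (hl : ∀ ln ∈ lines, ln ≠ "" → PySem.Str.strip ln ≠ "") :
    pvALoop fb lines title "" = (title, pvLeadB lines) := by
  induction lines with
  | nil => simp [pvALoop, pvLeadB]
  | cons ln rest ih =>
    have hrest : ∀ l ∈ rest, l ≠ "" → PySem.Str.strip l ≠ "" :=
      fun l m => hl l (List.mem_cons_of_mem _ m)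
    by_cases hp : pvP ln = true
    · have hne' : ln ≠ "" := by
        intro he; rw [he] at hp; simp [pvP] at hp
      have hs : PySem.Str.strip ln ≠ "" := hl ln List.mem_cons_self hne'
      have hs' : (PySem.Str.strip ln != "") = true := by simpa using hs
      have hp' := hp
      simp only [pvP, Bool.and_eq_true] at hp'
      have hpb : PySem.Chars.startswith ln.toList ['#'] = false := by
        simpa using hp'.2
      simp [pvALoop, hne, hp'.1, hpb, hs', pvLeadB, List.findIdx_cons, hp]
    · have hp' : pvP ln = false := by simpa using hp
      have hps : (ln == "") = true ∨ PySem.Chars.startswith ln.toList ['#'] = true := by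
        by_cases he : (ln == "") = true
        · exact Or.inl he
        · right
          have := hp'
          simp only [pvP, Bool.and_eq_false_iff] at this
          rcases this with h1 | h2
          · exact absurd (by simpa using h1) he
          · simpa using h2
      by_cases hh : PySem.Str.startswith ln "# " = true
      · simp only [pvALoop, hne]
        simp [pvLeadB, List.findIdx_cons, hp', ih hrest, pvHashOfHashSpace hh]
      · simp only [pvALoop]
        simp [pvLeadB, List.findIdx_cons, hp', ih hrest, hne]
        intro h1 h2
        rcases hps with h3 | h3
        · exact absurd (by simpa using h3) h1
        · rw [h3] at h2; exact absurd h2 (by simp)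

-- main loop characterisation: A's loop returns (first heading ≠ fb before the lead, lead)
theorem pvALoop_eq (fb : String) (lines : List String)
    (hl : ∀ ln ∈ lines, ln ≠ "" → PySem.Str.strip ln ≠ "") :
    pvALoop fb lines fb "" = (pvTitleA fb lines, pvLeadB lines) := by
  induction lines with
  | nil => simp [pvALoop, pvTitleA, pvCands, pvLeadB]
  | cons ln rest ih =>
    have hrest : ∀ l ∈ rest, l ≠ "" → PySem.Str.strip l ≠ "" :=
      fun l m => hl l (List.mem_cons_of_mem _ m)
    by_cases hh : PySem.Str.startswith ln "# " = true
    · have hhb := pvHashOfHashSpace hh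
      have hpf : pvP ln = false := by simp [pvP, hhb]
      by_cases ht : (pvHeadingText ln == fb) = true
      · have hteq : pvHeadingText ln = fb := by simpa using ht
        have hhs : PySem.Chars.startswith ln.toList ['#', ' '] = true := by simpa using hh
        simp only [pvALoop, hh, beq_self_eq_true, Bool.true_and, hteq]
        rw [ih hrest]
        simp [pvTitleA, pvCands, pvLeadB, List.findIdx_cons, hpf]
        rw [List.find?_cons_of_neg (by simp [hhs, hteq])]
      · have ht' : (pvHeadingText ln == fb) = false := by simpa using ht
        simp only [pvALoop, hh, beq_self_eq_true, Bool.true_and]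
        rw [pvALoop_fixed fb _ ht' rest hrest]
        have htne : (pvHeadingText ln != fb) = true := by
          simpa using ht'
        have hhs : PySem.Chars.startswith ln.toList ['#', ' '] = true := by simpa using hh
        simp [pvTitleA, pvCands, pvLeadB, List.findIdx_cons, hpf]
        rw [List.find?_cons_of_pos (by simp [hhs, htne])]
        simp [hhs]
    · by_cases hp : pvP ln = true
      · have hp' := hp
        simp only [pvP, Bool.and_eq_true] at hp'
        have hne' : ln ≠ "" := by simpa using hp'.1
        have hs : PySem.Str.strip ln ≠ "" := hl ln List.mem_cons_self hne'
        have hs' : (PySem.Str.strip ln != "") = true := by simpa using hs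
        have hpb : PySem.Chars.startswith ln.toList ['#'] = false := by
          simpa using hp'.2
        simp [pvALoop, hp'.1, hpb, hs', pvTitleA, pvCands, pvLeadB, List.findIdx_cons, hp]
        intro hc
        rw [pvHashOfHashSpace' hc] at hpb
        exact absurd hpb (by simp)
      · have hp' : pvP ln = false := by simpa using hp
        have hps : (ln == "") = true ∨ PySem.Chars.startswith ln.toList ['#'] = true := by
          by_cases he : (ln == "") = true
          · exact Or.inl he
          · right
            have h0 := hp'
            simp only [pvP, Bool.and_eq_false_iff] at h0
            rcases h0 with h1 | h2
            · exact absurd (by simpa using h1) he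
            · simpa using h2
        have hhs' : PySem.Chars.startswith ln.toList ['#', ' '] = false := by simpa using hh
        have hcond : ¬(¬ln = "" ∧ PySem.Chars.startswith ln.toList ['#'] = false) := by
          rintro ⟨h1, h2⟩
          rcases hps with h3 | h3
          · exact h1 (by simpa using h3)
          · rw [h3] at h2; exact absurd h2 (by simp)
        simp only [pvALoop]
        simp [pvTitleA, pvCands, pvLeadB, List.findIdx_cons, hp', ih hrest, hhs', hcond]

-- bridging: D_'s candidate expression equals the proofs' pvCands
theorem pvTake_findIdx (p : String → Bool) (l : List String) :
    l.take (l.findIdx p) = l.takeWhile (fun x => !p x) := by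
  induction l with
  | nil => simp
  | cons a t ih =>
    by_cases h : p a = true
    · simp [List.findIdx_cons, h]
    · have h' : p a = false := by simpa using h
      simp [List.findIdx_cons, h', List.take_succ_cons, ih]

theorem pvFilterMapIf (p : String → Bool) (g : String → String) (l : List String) :
    (l.filter p).map g = l.filterMap (fun x => if p x then some (g x) else none) := by
  induction l with
  | nil => simp
  | cons a t ih =>
    by_cases h : p a = true
    · simp [h, ih]
    · have h' : p a = false := by simpa using h
      simp [h', ih]

theorem pvTs_eq (ls : List String) :
    ((ls.takeWhile (fun l => l == "" || PySem.Str.startswith l "#")).filter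
      (fun l => PySem.Str.startswith l "# ")).map pvHeadingText
    = pvCands ls := by
  unfold pvCands
  rw [pvTake_findIdx, pvFilterMapIf]
  have hpred : (fun x : String => !pvP x) = (fun l : String => l == "" || PySem.Str.startswith l "#") := by
    funext l
    simp [pvP, Bool.not_and, bne, Bool.not_not]
  rw [hpred]

-- outside the change region, "first candidate ≠ fb" and "first candidate" coincide
theorem pvTitle_agree (fb : String) (l : List String)
    (hd : ¬(l.head? = some fb ∧ (l.tail.any (fun t => t != fb)) = true)) :
    (l.find? (fun t => t != fb)).getD fb = (l.head?).getD fb := by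
  cases l with
  | nil => simp
  | cons a t =>
    by_cases ha : (a != fb) = true
    · simp [List.find?_cons_of_pos, ha]
    · have ha' : a = fb := by simpa using ha
      have htall : (t.any (fun x => x != fb)) = false := by
        by_contra hc
        exact hd ⟨by simp [ha'], by simpa using hc⟩
      have : ∀ x ∈ t, (x != fb) = false := by
        intro x hx
        by_contra hc
        have : (t.any (fun x => x != fb)) = true := List.any_eq_true.2 ⟨x, hx, by simpa using hc⟩
        rw [this] at htall; exact absurd htall (by simp)
      rw [List.find?_cons_of_neg (by simpa using ha), List.find?_eq_none.2 (by
        intro x hx; simpa using this x hx)]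
      simp [ha']

-- A's result in closed form
theorem pvA_eq (b fb : String) :
    title_and_lead_py b fb =
      (PySem.Str.slice (pvTitleA fb (pvLines b)) none (some 200),
       PySem.Str.slice (pvLeadB (pvLines b)) none (some 400)) := by
  unfold title_and_lead_py
  have hl : ∀ ln ∈ pvLines b, ln ≠ "" → PySem.Str.strip ln ≠ "" := by
    intro ln hln
    rcases List.mem_map.1 (by simpa [pvLines] using hln) with ⟨x, _, rfl⟩
    exact pvStrip_rstrip_ne x
  simp only []
  rw [pvALoop_eq fb _ hl]

-- B's result in closed form
theorem pvB_eq (b fb : String) :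
    title_and_lead_py_alt b fb =
      (PySem.Str.slice (((pvCands (pvLines b)).head?).getD fb) none (some 200),
       PySem.Str.slice (pvLeadB (pvLines b)) none (some 400)) := rfl

-- D_ unfolded to the proofs' vocabulary
theorem pvD_iff (b fb : String) : D_title_and_lead_py b fb ↔
    ((pvCands (pvLines b)).head? = some fb ∧
      ∃ t ∈ (pvCands (pvLines b)).tail.find? (fun x => x != fb),
        t.toList.take 200 ≠ fb.toList.take 200) := by
  unfold D_title_and_lead_py
  rw [pvTs_eq]

-- if the first candidate is fb, A's search continues in the tail
theorem pvFind_of_head (c : List String) (fb t0 : String) (h1 : c.head? = some fb)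
    (ht0 : c.tail.find? (fun x => x != fb) = some t0) :
    c.find? (fun t => t != fb) = some t0 := by
  cases c with
  | nil => simp at h1
  | cons a l =>
    have ha : a = fb := by simpa using h1
    subst ha
    rw [List.find?_cons_of_neg (by simp)]
    exact ht0

-- s[:200] as a character-list take
theorem pvSlice200 (s : String) : PySem.Str.slice s none (some 200) = String.ofList (s.toList.take 200) := by
  simp [PySem.Str.slice, PySem.List.slice_to]

theorem pvOfListInj {a b : List Char} (h : String.ofList a = String.ofList b) : a = b := by
  have := congrArg String.toList h
  simpa [String.toList_ofList] using this

-- ===== VERDICT (by name: the statements are the Claim_ definitions above) =====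
theorem title_and_lead_py_spec : Claim_unchanged_title_and_lead_py := by
  intro b fb _ hd
  rw [pvA_eq, pvB_eq]
  unfold pvTitleA
  by_cases hc : (pvCands (pvLines b)).head? = some fb ∧
      ((pvCands (pvLines b)).tail.any (fun t => t != fb)) = true
  · obtain ⟨h1, h2⟩ := hc
    rcases List.any_eq_true.1 h2 with ⟨t, htmem, htne⟩
    obtain ⟨t0, ht0⟩ := Option.isSome_iff_exists.1
      ((List.find?_isSome (p := fun x => x != fb)).2 ⟨t, htmem, htne⟩)
    have htake : t0.toList.take 200 = fb.toList.take 200 := by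
      by_contra hne
      exact hd ((pvD_iff b fb).2 ⟨h1, t0, by simpa using ht0, hne⟩)
    rw [pvFind_of_head _ fb t0 h1 ht0, h1]
    simp only [Option.getD_some]
    rw [pvSlice200, pvSlice200, htake]
  · rw [pvTitle_agree fb _ hc]

theorem title_and_lead_py_changed : Claim_changed_title_and_lead_py := by
  unfold Claim_changed_title_and_lead_py; decide

theorem title_and_lead_py_tight : Claim_exact_title_and_lead_py := by
  intro b fb _ hD
  rw [pvD_iff] at hD
  obtain ⟨h1, t0, ht0, htake⟩ := hD
  rw [pvA_eq, pvB_eq]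
  unfold pvTitleA
  rw [pvFind_of_head _ fb t0 h1 (by simpa using ht0), h1]
  simp only [Option.getD_some]
  intro heq
  have hfst := congrArg Prod.fst heq
  simp only at hfst
  rw [pvSlice200, pvSlice200] at hfst
  exact htake (pvOfListInj hfst)
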